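-- pv_equiv track=rewrite | github.com/pypi-data/pypi-mirror-221 | packages/http-content-parser/http_content_parser-0.0.5.tar.gz/http_content_parser-0.0.5/src/http_content_parser/curl_parser.py | get_curl_line_num_scope
-- ===== SOURCE A (Python) =====
-- def get_curl_line_num_scope(lines):
--     start_num = 0
--     num = 0
--     curl_num = 0
--     line_num_array = []
--     for line in lines:
--         # 拆分多个curl
--         if 'curl' in line:
--             curl_num += 1
--             if curl_num >= 2:
--                 line_num_array.append([start_num, num-1])
--                 curl_num = 1
--             start_num = num
--         num += 1
--         if num == len(lines):
--             line_num_array.append([start_num, num])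
--     return line_num_array
-- ===== SOURCE B (Python) =====
-- def get_curl_line_num_scope(lines):
--     indices = [i for i, line in enumerate(lines) if 'curl' in line]
--     if not lines:
--         return []
--     if not indices:
--         return [[0, len(lines)]]
--     result = [[indices[k], indices[k + 1] - 1] for k in range(len(indices) - 1)]
--     result.append([indices[-1], len(lines)])
--     return result
-- ===== Notes on version B (the rewrite author's own statement) =====
-- stated objective: simpler
-- what changed: Replaces A's interleaved stateful scan (start_num/num/curl_num bookkeeping with in-loop end-of-list detection) by an index-table-first decomposition: collect the marker positions once, handle the two edge cases explicitly, then emit the ranges from consecutive index pairs.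
import Mathlib
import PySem

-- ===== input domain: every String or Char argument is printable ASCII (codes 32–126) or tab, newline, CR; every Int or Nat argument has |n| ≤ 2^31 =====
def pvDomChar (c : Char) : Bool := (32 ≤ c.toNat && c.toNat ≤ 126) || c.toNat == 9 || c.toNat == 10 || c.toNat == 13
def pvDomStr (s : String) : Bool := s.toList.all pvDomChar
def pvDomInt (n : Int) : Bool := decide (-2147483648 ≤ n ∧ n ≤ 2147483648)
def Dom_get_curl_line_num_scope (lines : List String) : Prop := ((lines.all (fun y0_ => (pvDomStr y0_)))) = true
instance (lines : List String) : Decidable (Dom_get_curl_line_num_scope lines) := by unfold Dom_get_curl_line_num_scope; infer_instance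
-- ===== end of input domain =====

-- B first builds the table of curl-marker indices and emits the ranges from consecutive pairs (edge cases handled explicitly),
-- instead of A's interleaved stateful single pass; objective: simpler.

-- ===== PORT A =====
-- the for-loop of A, state (start_num, num, curl_num, line_num_array); n = len(lines)
def pvLoopA (n : Int) : List String → Int → Int → Int → List (List Int) → List (List Int)
  | [], _, _, _, arr => arr
  | line :: rest, start, num, curl, arr =>
    let st :=
      if PySem.Str.isIn "curl" line then
        let curl' := curl + 1
        if curl' ≥ 2 then (num, 1, arr ++ [[start, num - 1]])
        else (num, curl', arr)
      else (start, curl, arr)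
    let num' := num + 1
    let arr' := if num' = n then st.2.2 ++ [[st.1, num']] else st.2.2
    pvLoopA n rest st.1 num' st.2.1 arr'

def get_curl_line_num_scope (lines : List String) : List (List Int) :=
  pvLoopA (lines.length : Int) lines 0 0 0 []

-- ===== PORT B =====
def get_curl_line_num_scope_alt (lines : List String) : List (List Int) :=
  let indices : List Int :=
    (PySem.List.enumerate lines 0).filterMap
      (fun p => if PySem.Str.isIn "curl" p.2 then some p.1 else none)
  if lines = [] then []
  else
    match indices with
    | [] => [[(0 : Int), (lines.length : Int)]]
    | _ :: _ =>
      (List.zipWith (fun a b => [a, b - 1]) indices indices.tail)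
        ++ [[indices.getLast!, (lines.length : Int)]]

-- ===== PRECONDITION & SPEC =====
def Spec_get_curl_line_num_scope (lines : List String) (out : List (List Int)) : Prop := out = get_curl_line_num_scope_alt lines
instance (lines : List String) (out : List (List Int)) : Decidable (Spec_get_curl_line_num_scope lines out) := by unfold Spec_get_curl_line_num_scope; infer_instance

-- ===== CLAIM (what is proved, stated in full; the proofs are below) =====
def Claim_equal_get_curl_line_num_scope : Prop := ∀ (lines : List String), Dom_get_curl_line_num_scope lines → Spec_get_curl_line_num_scope lines (get_curl_line_num_scope lines)

-- ===== LEMMAS AND PROOFS =====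

-- absolute indices (starting at num) of the remaining lines that contain "curl"
def pvAbsIdx : Int → List String → List Int
  | _, [] => []
  | num, l :: r => if PySem.Str.isIn "curl" l then num :: pvAbsIdx (num + 1) r else pvAbsIdx (num + 1) r

-- the chain of ranges A emits once a curl at position s has been seen
def pvChain (s : Int) (idx : List Int) (n : Int) : List (List Int) :=
  match idx with
  | [] => [[s, n]]
  | i :: is => [s, i - 1] :: pvChain i is n

-- A's loop after the first curl (curl_num = 1, start = its position) appends pvChain
theorem pvLoopA_one (n : Int) (rest : List String) :
    ∀ (start num : Int) (arr : List (List Int)), rest ≠ [] → num + rest.length = n →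
      pvLoopA n rest start num 1 arr = arr ++ pvChain start (pvAbsIdx num rest) n := by
  induction rest with
  | nil => intro _ _ _ h; exact absurd rfl h
  | cons l r ih =>
    intro start num arr _ hn
    simp only [List.length_cons] at hn
    by_cases hc : PySem.Str.isIn "curl" l
    all_goals simp at hc
    · by_cases hr : r = []
      · subst hr
        simp only [List.length_nil] at hn
        simp [pvLoopA, pvAbsIdx, pvChain, hc, show num + 1 = n by omega]
      · have hne : ¬ (num + 1 = n) := by
          have : 0 < r.length := List.length_pos_iff.mpr hr
          omega
        have hrec := ih num (num + 1) (arr ++ [[start, num - 1]]) hr (by omega)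
        simp [pvLoopA, pvAbsIdx, hc, hne]
        rw [hrec, pvChain]
        simp
    · by_cases hr : r = []
      · subst hr
        simp only [List.length_nil] at hn
        simp [pvLoopA, pvAbsIdx, pvChain, hc, show num + 1 = n by omega]
      · have hne : ¬ (num + 1 = n) := by
          have : 0 < r.length := List.length_pos_iff.mpr hr
          omega
        have hrec := ih start (num + 1) arr hr (by omega)
        simp [pvLoopA, pvAbsIdx, hc, hne]
        rw [hrec]

-- A's loop before the first curl (curl_num = 0)
theorem pvLoopA_zero (n : Int) (rest : List String) :
    ∀ (start num : Int) (arr : List (List Int)), rest ≠ [] → num + rest.length = n →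
      pvLoopA n rest start num 0 arr = arr ++ (match pvAbsIdx num rest with
        | [] => [[start, n]]
        | i :: is => pvChain i is n) := by
  induction rest with
  | nil => intro _ _ _ h; exact absurd rfl h
  | cons l r ih =>
    intro start num arr _ hn
    simp only [List.length_cons] at hn
    by_cases hc : PySem.Str.isIn "curl" l
    all_goals simp at hc
    · by_cases hr : r = []
      · subst hr
        simp only [List.length_nil] at hn
        simp [pvLoopA, pvAbsIdx, pvChain, hc, show num + 1 = n by omega]
      · have hne : ¬ (num + 1 = n) := by
          have : 0 < r.length := List.length_pos_iff.mpr hr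
          omega
        have hrec := pvLoopA_one n r num (num + 1) arr hr (by omega)
        simp [pvLoopA, pvAbsIdx, hc, hne]
        rw [hrec]
    · by_cases hr : r = []
      · subst hr
        simp only [List.length_nil] at hn
        simp [pvLoopA, pvAbsIdx, pvChain, hc, show num + 1 = n by omega]
      · have hne : ¬ (num + 1 = n) := by
          have : 0 < r.length := List.length_pos_iff.mpr hr
          omega
        have hrec := ih start (num + 1) arr hr (by omega)
        simp [pvLoopA, pvAbsIdx, hc, hne]
        rw [hrec]

-- B's index table equals pvAbsIdx
theorem pvFilterMap_enumerate (lines : List String) :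
    ∀ s : Int, (PySem.List.enumerate lines s).filterMap
        (fun p => if PySem.Str.isIn "curl" p.2 then some p.1 else none) = pvAbsIdx s lines := by
  induction lines with
  | nil => intro s; simp [PySem.List.enumerate_nil, pvAbsIdx]
  | cons l r ih =>
    intro s
    have ih' := ih (s + 1)
    simp at ih'
    by_cases hc : PySem.Str.isIn "curl" l
    all_goals simp at hc
    all_goals simp [PySem.List.enumerate_cons, pvAbsIdx, hc, ih']

-- the chain is B's pairwise zip plus the final block
theorem pvChain_eq_zip (is : List Int) :
    ∀ (i n : Int), pvChain i is n =
      List.zipWith (fun a b => [a, b - 1]) (i :: is) is ++ [[(i :: is).getLast!, n]] := by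
  induction is with
  | nil => intro i n; simp [pvChain]
  | cons j js ih =>
    intro i n
    simp [pvChain, ih j n]

-- ===== VERDICT (by name: the statement is the Claim_ definition above) =====
theorem get_curl_line_num_scope_spec : Claim_equal_get_curl_line_num_scope := by
  intro lines _
  unfold Spec_get_curl_line_num_scope
  cases lines with
  | nil => rfl
  | cons l r =>
    unfold get_curl_line_num_scope get_curl_line_num_scope_alt
    rw [pvFilterMap_enumerate (l :: r) 0]
    rw [pvLoopA_zero ((l :: r).length : Int) (l :: r) 0 0 [] (by simp) (by simp)]
    simp only [if_neg (by simp : ¬ (l :: r = []))]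
    cases h : pvAbsIdx 0 (l :: r) with
    | nil => simp
    | cons i is => exact pvChain_eq_zip is i _
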